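-- pv_equiv track=rewrite | github.com/JirinAdam/Portfolio | Pracuj/Support/nerds_database_v1.py | _unordered_prefix_match
-- ===== SOURCE A (Python) =====
-- from typing import List, Tuple, Optional, Dict, Any
--
-- def _unordered_prefix_match(title_tokens: List[str], kw_tokens: List[str]) -> bool:
--     """
--     Returns True if for every keyword token, there exists at least one title token
--     that starts with the keyword token (prefix match). Order doesn't matter.
--     """
--     if not kw_tokens:
--         return False
--     # Slight micro-optimization: for each kw token, scan title tokens
--     for kw in kw_tokens:
--         found = False
--         for tt in title_tokens:
--             if tt.startswith(kw):
--                 found = True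
--                 break
--         if not found:
--             return False
--     return True
-- ===== SOURCE B (Python) =====
-- def _unordered_prefix_match(title_tokens, kw_tokens):
--     """
--     True iff kw_tokens is nonempty and every keyword token is a prefix of
--     some title token. One pass builds an index (set) of all prefixes of all
--     title tokens; each keyword is then a single set lookup, so the inner
--     scan over title tokens per keyword disappears.
--     """
--     if not kw_tokens:
--         return False
--     prefixes = set()
--     for tt in title_tokens:
--         for i in range(len(tt) + 1):
--             prefixes.add(tt[:i])
--     return all(kw in prefixes for kw in kw_tokens)
-- ===== Notes on version B (the rewrite author's own statement) =====
-- stated objective: alternative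
-- what changed: Instead of scanning all title tokens for each keyword, B builds a hash set of every prefix of every title token once and answers each keyword by a single set lookup.
import Mathlib
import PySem

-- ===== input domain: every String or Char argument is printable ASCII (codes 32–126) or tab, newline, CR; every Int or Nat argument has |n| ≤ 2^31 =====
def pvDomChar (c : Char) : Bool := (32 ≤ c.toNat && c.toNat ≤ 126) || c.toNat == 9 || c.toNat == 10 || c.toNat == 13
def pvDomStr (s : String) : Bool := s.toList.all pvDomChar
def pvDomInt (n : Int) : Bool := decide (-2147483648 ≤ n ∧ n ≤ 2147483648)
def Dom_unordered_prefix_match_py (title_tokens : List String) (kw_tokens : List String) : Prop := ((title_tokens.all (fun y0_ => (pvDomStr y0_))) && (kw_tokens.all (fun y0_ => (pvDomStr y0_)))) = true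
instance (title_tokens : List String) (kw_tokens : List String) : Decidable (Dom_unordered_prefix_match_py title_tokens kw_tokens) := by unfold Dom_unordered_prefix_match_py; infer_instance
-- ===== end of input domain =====

-- B replaces A's per-keyword scan of title tokens by a set of all title-token prefixes
-- built once, each keyword becoming one set lookup (alternative algorithm, not claimed faster).


-- ===== PORT A =====
-- inner loop: 'found = False; for tt in title_tokens: if tt.startswith(kw): found = True; break'
def pvAFound (title_tokens : List String) (kw : String) : Bool :=
  match title_tokens with
  | [] => false
  | tt :: rest => if PySem.Str.startswith tt kw then true else pvAFound rest kw

-- outer loop: 'for kw in kw_tokens: … ; if not found: return False' then 'return True'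
def pvALoop (title_tokens : List String) (kw_tokens : List String) : Bool :=
  match kw_tokens with
  | [] => true
  | kw :: rest =>
      if !(pvAFound title_tokens kw) then false else pvALoop title_tokens rest

def unordered_prefix_match_py (title_tokens : List String) (kw_tokens : List String) : Bool :=
  if kw_tokens.isEmpty then false else pvALoop title_tokens kw_tokens

-- ===== PORT B =====
-- 'prefixes = set(); for tt in title_tokens: for i in range(len(tt)+1): prefixes.add(tt[:i])'
def pvPrefixes (title_tokens : List String) : PySem.Set String :=
  title_tokens.foldl
    (fun s tt =>
      (PySem.List.pyRange 0 ((PySem.Str.len tt : Int) + 1) 1).foldl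
        (fun s i => PySem.Set.add s (PySem.Str.slice tt none (some i))) s)
    PySem.Set.empty

def unordered_prefix_match_py_alt (title_tokens : List String) (kw_tokens : List String) : Bool :=
  if kw_tokens.isEmpty then false
  else kw_tokens.all (fun kw => PySem.Set.contains (pvPrefixes title_tokens) kw)

-- ===== PRECONDITION & SPEC =====
def Spec_unordered_prefix_match_py (title_tokens : List String) (kw_tokens : List String) (out : Bool) : Prop := out = unordered_prefix_match_py_alt title_tokens kw_tokens
instance (title_tokens : List String) (kw_tokens : List String) (out : Bool) : Decidable (Spec_unordered_prefix_match_py title_tokens kw_tokens out) := by unfold Spec_unordered_prefix_match_py; infer_instance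

-- ===== CLAIM (what is proved, stated in full; the proofs are below) =====
def Claim_equal_unordered_prefix_match_py : Prop := ∀ (title_tokens : List String) (kw_tokens : List String), Dom_unordered_prefix_match_py title_tokens kw_tokens → Spec_unordered_prefix_match_py title_tokens kw_tokens (unordered_prefix_match_py title_tokens kw_tokens)

-- ===== LEMMAS AND PROOFS =====

-- membership in a fold of Set.add over any index list
theorem mem_foldl_set_add {α β : Type} [BEq α] [LawfulBEq α] (g : β → α)
    (l : List β) (s : PySem.Set α) (y : α) :
    (y ∈ l.foldl (fun s i => PySem.Set.add s (g i)) s) ↔ y ∈ s ∨ ∃ i ∈ l, g i = y := by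
  induction l generalizing s with
  | nil => simp
  | cons i rest ih =>
      simp only [List.foldl_cons, ih, PySem.Set.mem_add]
      constructor
      · rintro (⟨h | h⟩ | ⟨j, hj, hg⟩)
        · exact Or.inl h
        · exact Or.inr ⟨i, by simp, h.symm⟩
        · exact Or.inr ⟨j, by simp [hj], hg⟩
      · rintro (h | ⟨j, hj, hg⟩)
        · exact Or.inl (Or.inl h)
        · rcases List.mem_cons.mp hj with rfl | hj
          · exact Or.inl (Or.inr hg.symm)
          · exact Or.inr ⟨j, hj, hg⟩

-- a keyword is in the prefix slices of tt iff tt.startswith(kw)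
theorem exists_slice_iff_startswith (tt kw : String) :
    (∃ i ∈ PySem.List.pyRange 0 ((PySem.Str.len tt : Int) + 1) 1,
        PySem.Str.slice tt none (some i) = kw) ↔ PySem.Str.startswith tt kw = true := by
  constructor
  · rintro ⟨i, hi, hs⟩
    rcases (PySem.List.mem_pyRange_one).mp hi with ⟨h0, _⟩
    have hl : kw.toList = tt.toList.take i.toNat := by
      rw [← hs]; simp [PySem.List.slice_to _ h0]
    simp only [PySem.Str.startswith_eq, PySem.Chars.startswith_iff, hl]
    exact List.take_prefix _ _
  · intro h
    have hpre : kw.toList <+: tt.toList := by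
      simpa [PySem.Str.startswith_eq, PySem.Chars.startswith_iff] using h
    refine ⟨(kw.toList.length : Int), ?_, ?_⟩
    · refine (PySem.List.mem_pyRange_one).mpr ⟨by positivity, ?_⟩
      have := hpre.length_le
      simp only [PySem.Str.len_eq]
      omega
    · apply String.toList_inj.mp
      simp [PySem.List.slice_to _ (Int.natCast_nonneg _)]
      simpa using (List.prefix_iff_eq_take.mp hpre).symm

theorem mem_prefixes_fold (tts : List String) (s : PySem.Set String) (kw : String) :
    (kw ∈ tts.foldl
        (fun s tt =>
          (PySem.List.pyRange 0 ((PySem.Str.len tt : Int) + 1) 1).foldl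
            (fun s i => PySem.Set.add s (PySem.Str.slice tt none (some i))) s) s)
      ↔ kw ∈ s ∨ ∃ tt ∈ tts, PySem.Str.startswith tt kw = true := by
  induction tts generalizing s with
  | nil => simp
  | cons tt rest ih =>
      simp only [List.foldl_cons, ih, mem_foldl_set_add, exists_slice_iff_startswith]
      constructor
      · rintro ((h | h) | ⟨t, ht, hs⟩)
        exacts [Or.inl h, Or.inr ⟨tt, by simp, h⟩, Or.inr ⟨t, by simp [ht], hs⟩]
      · rintro (h | ⟨t, ht, hs⟩)
        · exact Or.inl (Or.inl h)
        · rcases List.mem_cons.mp ht with rfl | ht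
          · exact Or.inl (Or.inr hs)
          · exact Or.inr ⟨t, ht, hs⟩

theorem mem_pvPrefixes (title_tokens : List String) (kw : String) :
    kw ∈ pvPrefixes title_tokens ↔ ∃ tt ∈ title_tokens, PySem.Str.startswith tt kw = true := by
  unfold pvPrefixes
  rw [mem_prefixes_fold]
  simp [PySem.Set.empty]

theorem pvAFound_eq (title_tokens : List String) (kw : String) :
    pvAFound title_tokens kw = PySem.Set.contains (pvPrefixes title_tokens) kw := by
  rw [Bool.eq_iff_iff]
  rw [PySem.Set.contains_iff, mem_pvPrefixes]
  induction title_tokens with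
  | nil => simp [pvAFound]
  | cons tt rest ih =>
      simp only [pvAFound]
      split_ifs with h
      · exact ⟨fun _ => ⟨tt, by simp, h⟩, fun _ => rfl⟩
      · rw [ih]
        constructor
        · rintro ⟨t, ht, hs⟩; exact ⟨t, List.mem_cons_of_mem _ ht, hs⟩
        · rintro ⟨t, ht, hs⟩
          rcases List.mem_cons.mp ht with rfl | ht
          · exact absurd hs h
          · exact ⟨t, ht, hs⟩

theorem pvALoop_eq (title_tokens kw_tokens : List String) :
    pvALoop title_tokens kw_tokens
      = kw_tokens.all (fun kw => PySem.Set.contains (pvPrefixes title_tokens) kw) := by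
  induction kw_tokens with
  | nil => simp [pvALoop]
  | cons kw rest ih =>
      simp only [pvALoop, List.all_cons, ih, ← pvAFound_eq]
      cases pvAFound title_tokens kw <;> simp

-- ===== VERDICT (by name: the statement is the Claim_ definition above) =====
theorem unordered_prefix_match_py_spec : Claim_equal_unordered_prefix_match_py := by
  intro title_tokens kw_tokens _
  unfold Spec_unordered_prefix_match_py unordered_prefix_match_py unordered_prefix_match_py_alt
  split_ifs with h
  · rfl
  · exact pvALoop_eq title_tokens kw_tokens
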